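-- pv_equiv track=rewrite | github.com/SanthoshMummadi/AdoptionIntelligenceAgent | scripts/debug_gm_row_final.py | get_sf_products_display
-- ===== SOURCE A (Python) =====
-- APM_L1_DISPLAY_MAP = {
--     "Salesforce Platform": "Platform",
--     "Integration": "MuleSoft",
--     "AI and Data": "Data Cloud",
--     "Cross Cloud - CRM": "CRM",
--     "Cross Cloud - Einstein": "Einstein",
-- }
--
-- APM_L1_EXCLUDE = {"Other", ""}
--
-- def get_sf_products_display(all_products):
--     unique_l1s = list(
--         dict.fromkeys(
--             str(p.get("APM_LVL_1") or "").strip()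
--             for p in all_products
--             if str(p.get("APM_LVL_1") or "").strip()
--         )
--     )
--     cleaned = []
--     for l1 in unique_l1s:
--         if l1 in APM_L1_EXCLUDE:
--             continue
--         display = APM_L1_DISPLAY_MAP.get(l1, l1)
--         if display not in cleaned:
--             cleaned.append(display)
--     return ", ".join(cleaned) if cleaned else "N/A"
-- ===== SOURCE B (Python) =====
-- APM_L1_DISPLAY_MAP = {
--     "Salesforce Platform": "Platform",
--     "Integration": "MuleSoft",
--     "AI and Data": "Data Cloud",
--     "Cross Cloud - CRM": "CRM",
--     "Cross Cloud - Einstein": "Einstein",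
-- }
--
-- APM_L1_EXCLUDE = {"Other", ""}
--
-- def get_sf_products_display(all_products):
--     result = []
--     seen = set()
--     for p in all_products:
--         l1 = str(p.get("APM_LVL_1") or "").strip()
--         if not l1 or l1 in APM_L1_EXCLUDE:
--             continue
--         display = APM_L1_DISPLAY_MAP.get(l1, l1)
--         if display not in seen:
--             seen.add(display)
--             result.append(display)
--     return ", ".join(result) if result else "N/A"
-- ===== Notes on version B (the rewrite author's own statement) =====
-- stated objective: simpler
-- what changed: Replaced the two-phase pipeline (build an intermediate dict.fromkeys-deduped list of raw level-1 names, then a second loop mapping to display names with list-membership dedup) by one loop over all_products that filters, maps and dedups display names directly with a seen set.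
import Mathlib
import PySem

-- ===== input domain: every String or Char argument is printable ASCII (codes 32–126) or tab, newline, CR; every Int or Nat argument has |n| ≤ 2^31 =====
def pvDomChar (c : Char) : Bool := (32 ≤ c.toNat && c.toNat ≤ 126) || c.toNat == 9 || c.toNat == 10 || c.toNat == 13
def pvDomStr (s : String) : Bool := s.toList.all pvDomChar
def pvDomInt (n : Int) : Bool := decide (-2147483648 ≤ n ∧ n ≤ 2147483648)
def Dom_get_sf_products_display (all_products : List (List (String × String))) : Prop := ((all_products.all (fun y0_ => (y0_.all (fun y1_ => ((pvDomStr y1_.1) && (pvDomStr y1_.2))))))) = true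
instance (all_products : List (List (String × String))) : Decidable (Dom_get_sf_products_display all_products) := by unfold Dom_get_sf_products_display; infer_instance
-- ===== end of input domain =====

-- B fuses A's two-phase pipeline (dedup raw names, then map/dedup display names) into one pass; objective: simpler.

-- module-level constants shared by both Pythons
def pvDisplayMap : PySem.Dict String String :=
  ⟨[("Salesforce Platform", "Platform"), ("Integration", "MuleSoft"), ("AI and Data", "Data Cloud"),
    ("Cross Cloud - CRM", "CRM"), ("Cross Cloud - Einstein", "Einstein")]⟩

def pvExclude : PySem.Set String := PySem.Set.ofList ["Other", ""]

-- str(p.get("APM_LVL_1") or "").strip()  (values are strings; 'or ""' = default "" for missing/empty)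
def pvRaw (p : List (String × String)) : String :=
  PySem.Str.strip (PySem.Dict.getD ⟨p⟩ "APM_LVL_1" "")

-- ===== PORT A =====
def get_sf_products_display (all_products : List (List (String × String))) : String :=
  let unique_l1s : List String :=
    PySem.List.dedup
      ((all_products.filter (fun p => !(pvRaw p == ""))).map (fun p => pvRaw p))
  let cleaned : List String :=
    unique_l1s.foldl
      (fun cleaned l1 =>
        if pvExclude.contains l1 then cleaned
        else
          let display := PySem.Dict.getD pvDisplayMap l1 l1
          if cleaned.contains display then cleaned else cleaned ++ [display])
      []
  if cleaned ≠ [] then PySem.Str.join ", " cleaned else "N/A"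

-- ===== PORT B =====
def get_sf_products_display_alt (all_products : List (List (String × String))) : String :=
  let st : List String × PySem.Set String :=
    all_products.foldl
      (fun (acc : List String × PySem.Set String) p =>
        let l1 := pvRaw p
        if l1 == "" || pvExclude.contains l1 then acc
        else
          let display := PySem.Dict.getD pvDisplayMap l1 l1
          if acc.2.contains display then acc
          else (acc.1 ++ [display], acc.2.add display))
      ([], PySem.Set.empty)
  if st.1 ≠ [] then PySem.Str.join ", " st.1 else "N/A"

-- ===== PRECONDITION & SPEC =====
def Spec_get_sf_products_display (all_products : List (List (String × String))) (out : String) : Prop := out = get_sf_products_display_alt all_products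
instance (all_products : List (List (String × String))) (out : String) : Decidable (Spec_get_sf_products_display all_products out) := by unfold Spec_get_sf_products_display; infer_instance

-- ===== CLAIM (what is proved, stated in full; the proofs are below) =====
def Claim_equal_get_sf_products_display : Prop := ∀ (all_products : List (List (String × String))), Dom_get_sf_products_display all_products → Spec_get_sf_products_display all_products (get_sf_products_display all_products)

-- ===== LEMMAS AND PROOFS =====

-- A's second loop, as a named step function (its 'append if absent' branch is PySem.Set.add)
def stepA (c : List String) (l1 : String) : List String :=
  if pvExclude.contains l1 then c
  else PySem.Set.add c (PySem.Dict.getD pvDisplayMap l1 l1)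

-- B's step, over a raw level-1 string, accumulator = result list only
def stepB (c : List String) (l1 : String) : List String :=
  if l1 == "" || pvExclude.contains l1 then c
  else PySem.Set.add c (PySem.Dict.getD pvDisplayMap l1 l1)

-- B's actual step over a product, with the (result, seen) pair
def stepP (acc : List String × PySem.Set String) (p : List (String × String)) :
    List String × PySem.Set String :=
  let l1 := pvRaw p
  if l1 == "" || pvExclude.contains l1 then acc
  else
    let display := PySem.Dict.getD pvDisplayMap l1 l1
    if acc.2.contains display then acc
    else (acc.1 ++ [display], acc.2.add display)

theorem mem_stepA (c : List String) (l1 y : String) (hy : y ∈ c) : y ∈ stepA c l1 := by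
  unfold stepA
  split
  · exact hy
  · exact (PySem.Set.mem_add c _ y).mpr (Or.inl hy)

theorem mono_foldl_stepA (l : List String) (c : List String) (y : String)
    (hy : y ∈ c) : y ∈ l.foldl stepA c := by
  induction l generalizing c with
  | nil => exact hy
  | cons x xs ih => exact ih (stepA c x) (mem_stepA c x y hy)

theorem disp_mem_foldl_stepA (l : List String) (c : List String) (x : String)
    (hx : x ∈ l) (hexcl : pvExclude.contains x = false) :
    PySem.Dict.getD pvDisplayMap x x ∈ l.foldl stepA c := by
  induction l generalizing c with
  | nil => cases hx
  | cons z zs ih =>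
    rcases List.mem_cons.mp hx with rfl | hz
    · refine mono_foldl_stepA zs (stepA c x) _ ?_
      unfold stepA
      rw [hexcl]
      simp only [Bool.false_eq_true, if_false]
      exact (PySem.Set.mem_add c _ _).mpr (Or.inr rfl)
    · exact ih (stepA c z) hz

theorem stepA_absorb (l : List String) (c : List String) (x : String) (hx : x ∈ l) :
    stepA (l.foldl stepA c) x = l.foldl stepA c := by
  unfold stepA
  split
  · rfl
  · rename_i h
    exact PySem.Set.add_of_mem
      (disp_mem_foldl_stepA l c x hx (Bool.eq_false_iff.mpr h))

theorem foldl_stepA_ofList (l : List String) (c : List String) :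
    (PySem.Set.ofList l).foldl stepA c = l.foldl stepA c := by
  induction l using List.reverseRecOn generalizing c with
  | nil => rfl
  | append_singleton xs x ih =>
    rw [PySem.Set.ofList_append_singleton, List.foldl_append]
    by_cases hx : x ∈ xs
    · rw [PySem.Set.add_of_mem ((PySem.Set.mem_ofList xs x).mpr hx), ih]
      simp only [List.foldl_cons, List.foldl_nil]
      exact (stepA_absorb xs c x hx).symm
    · rw [PySem.Set.add_of_not_mem (fun h => hx ((PySem.Set.mem_ofList xs x).mp h)),
        List.foldl_append, ih]

theorem foldl_stepA_filter (l : List String) (c : List String) :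
    (l.filter (fun x => !(x == ""))).foldl stepA c = l.foldl stepB c := by
  induction l generalizing c with
  | nil => rfl
  | cons x xs ih =>
    by_cases hx : x = ""
    · subst hx
      have h1 : List.filter (fun x => !(x == "")) ("" :: xs) =
          List.filter (fun x => !(x == "")) xs := by simp
      have h2 : stepB c "" = c := rfl
      rw [h1, ih, List.foldl_cons, h2]
    · have hbe : (x == "") = false := by simp [hx]
      have h1 : List.filter (fun x => !(x == "")) (x :: xs) =
          x :: List.filter (fun x => !(x == "")) xs := by simp [hbe]
      have h2 : stepA c x = stepB c x := by
        unfold stepA stepB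
        rw [hbe]
        simp only [Bool.false_or]
      rw [h1, List.foldl_cons, List.foldl_cons, ih, h2]

theorem foldl_stepP_fst (l : List (List (String × String))) (res : List String)
    (seen : PySem.Set String) (hinv : ∀ y, y ∈ seen ↔ y ∈ res) :
    (l.foldl stepP (res, seen)).1 = (l.map pvRaw).foldl stepB res := by
  induction l generalizing res seen with
  | nil => rfl
  | cons p ps ih =>
    rw [List.foldl_cons, List.map_cons, List.foldl_cons]
    by_cases hc : (pvRaw p == "" || pvExclude.contains (pvRaw p)) = true
    · have e1 : stepP (res, seen) p = (res, seen) := by unfold stepP; rw [if_pos hc]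
      have e2 : stepB res (pvRaw p) = res := by unfold stepB; rw [if_pos hc]
      rw [e1, e2]
      exact ih res seen hinv
    · by_cases hd : PySem.Dict.getD pvDisplayMap (pvRaw p) (pvRaw p) ∈ seen
      · have e1 : stepP (res, seen) p = (res, seen) := by
          unfold stepP
          rw [if_neg hc]
          simp [hd]
        have e2 : stepB res (pvRaw p) = res := by
          unfold stepB
          rw [if_neg hc]
          exact PySem.Set.add_of_mem ((hinv _).mp hd)
        rw [e1, e2]
        exact ih res seen hinv
      · have hdr : PySem.Dict.getD pvDisplayMap (pvRaw p) (pvRaw p) ∉ res :=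
          fun h => hd ((hinv _).mpr h)
        have e1 : stepP (res, seen) p =
            (res ++ [PySem.Dict.getD pvDisplayMap (pvRaw p) (pvRaw p)],
             seen ++ [PySem.Dict.getD pvDisplayMap (pvRaw p) (pvRaw p)]) := by
          unfold stepP
          rw [if_neg hc]
          simp only [PySem.Set.add_of_not_mem hd]
          simp [hd]
        have e2 : stepB res (pvRaw p) =
            res ++ [PySem.Dict.getD pvDisplayMap (pvRaw p) (pvRaw p)] := by
          unfold stepB
          rw [if_neg hc]
          exact PySem.Set.add_of_not_mem hdr
        rw [e1, e2]
        apply ih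
        intro y
        simp only [List.mem_append, List.mem_singleton, hinv y]

theorem cleaned_eq (all_products : List (List (String × String))) :
    (PySem.List.dedup
        ((all_products.filter (fun p => !(pvRaw p == ""))).map (fun p => pvRaw p))).foldl
      (fun cleaned l1 =>
        if pvExclude.contains l1 then cleaned
        else
          let display := PySem.Dict.getD pvDisplayMap l1 l1
          if cleaned.contains display then cleaned else cleaned ++ [display]) [] =
    (all_products.foldl stepP ([], PySem.Set.empty)).1 := by
  have hstep : (fun (cleaned : List String) (l1 : String) =>
      if pvExclude.contains l1 then cleaned
      else
        let display := PySem.Dict.getD pvDisplayMap l1 l1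
        if cleaned.contains display then cleaned else cleaned ++ [display]) = stepA := by
    funext c l1
    unfold stepA
    rw [PySem.Set.add_eq_ite]
    simp only [List.contains_iff_mem]
  have hmapfil : (all_products.filter (fun p => !(pvRaw p == ""))).map (fun p => pvRaw p) =
      (all_products.map pvRaw).filter (fun x => !(x == "")) := by
    rw [List.filter_map]
    rfl
  rw [hstep, hmapfil, PySem.List.dedup_eq_ofList, foldl_stepA_ofList, foldl_stepA_filter,
    foldl_stepP_fst all_products [] PySem.Set.empty (by simp [PySem.Set.empty])]

-- ===== VERDICT (by name: the statement is the Claim_ definition above) =====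
theorem get_sf_products_display_spec : Claim_equal_get_sf_products_display := by
  intro all_products _
  unfold Spec_get_sf_products_display get_sf_products_display get_sf_products_display_alt
  simp only
  rw [cleaned_eq all_products]
  rfl
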